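-- pv_equiv track=rewrite | github.com/Lcui97/CPSC-335-Project2-Algo1 | search_substrings.py | find_target_substrings
-- ===== SOURCE A (Python) =====
-- def find_substring_indices(text, pattern):
--     """
--     Returns the starting index of 'pattern' in 'text' (first occurrence),
--     or -1 if not found. (Naive approach)
--     """
--     t_len = len(text)
--     p_len = len(pattern)
--
--     for start in range(t_len - p_len + 1):
--         match = True
--         for i in range(p_len):
--             if text[start + i] != pattern[i]:
--                 match = False
--                 break
--         if match:
--             return start
--     return -1
--
-- def find_target_substrings(A, B):
--     """
--     A: array with exactly one element - a long concatenated string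
--     B: array of target words
--     Returns:
--       indices_list: list of integer positions where each target word appears
--       words_list:   list of the actual matched words in order of appearance
--     """
--     concatenated_string = A[0]  # Single large string
--     found_pairs = []           # Will store tuples of (index, word)
--
--     for word in B:
--         index_found = find_substring_indices(concatenated_string, word)
--         if index_found != -1:
--             found_pairs.append((index_found, word))
--
--     # Sort by the index
--     found_pairs.sort(key=lambda x: x[0])
--
--     # Separate out indices and words in order
--     indices_list = [pair[0] for pair in found_pairs]
--     words_list   = [pair[1] for pair in found_pairs]
--
--     return indices_list, words_list
-- ===== SOURCE B (Python) =====
-- def find_target_substrings(A, B):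
--     """
--     Single left-to-right scan of the text: at each position, check which of the
--     still-unlocated (distinct) target words start here; record the position in a
--     dict word -> first index; stop early once every word is located.  Then pair
--     up and sort as before.
--     """
--     text = A[0]
--     first = {}                      # word -> index of first occurrence
--     remaining = list(dict.fromkeys(B))  # distinct words, not yet located
--     for pos in range(len(text) + 1):
--         if not remaining:
--             break
--         still = []
--         for w in remaining:
--             if text.startswith(w, pos):
--                 first[w] = pos
--             else:
--                 still.append(w)
--         remaining = still
--     pairs = sorted(((first[w], w) for w in B if w in first), key=lambda p: p[0])
--     return [p[0] for p in pairs], [p[1] for p in pairs]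
-- ===== Notes on version B (the rewrite author's own statement) =====
-- stated objective: alternative
-- what changed: Instead of running a naive per-word character-by-character search over the whole text for every word and then sorting, B makes a single left-to-right scan of the text, checking at each position which still-unlocated distinct words start there (str.startswith), records first occurrences in a dict, and stops early once all words are found; Pre_ excludes empty A, on which A[0] raises IndexError.
import Mathlib
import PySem

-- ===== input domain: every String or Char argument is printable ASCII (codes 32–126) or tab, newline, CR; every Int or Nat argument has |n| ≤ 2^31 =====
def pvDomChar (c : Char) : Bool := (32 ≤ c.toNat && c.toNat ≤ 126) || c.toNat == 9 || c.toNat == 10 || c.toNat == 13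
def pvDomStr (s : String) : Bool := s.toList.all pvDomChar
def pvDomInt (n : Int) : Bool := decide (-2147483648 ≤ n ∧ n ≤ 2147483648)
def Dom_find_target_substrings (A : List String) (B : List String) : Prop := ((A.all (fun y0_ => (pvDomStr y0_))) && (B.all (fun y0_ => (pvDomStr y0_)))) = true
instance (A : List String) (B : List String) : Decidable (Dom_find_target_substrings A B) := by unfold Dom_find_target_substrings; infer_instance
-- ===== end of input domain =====

-- B replaces A's per-word naive search + sort by a single left-to-right scan of the
-- text that locates all (distinct) words at once; equivalence of the RETURN value is
-- proved on Pre_ (A nonempty; A[0] raises IndexError on empty A).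

-- ===== PORT A =====
-- inner 'for i in range(p_len)' loop of find_substring_indices (break = all-scan;
-- indices are in range for every start the outer loop supplies, so getD is exact)
def fsiInner (text pattern : List Char) (start : Nat) : Bool :=
  (List.range pattern.length).all fun i => text.getD (start + i) ' ' == pattern.getD i ' '

-- outer 'for start in range(t_len - p_len + 1)' loop, returning on the first match
def fsiGo (text pattern : List Char) : List Nat → Int
  | [] => -1
  | s :: rest => if fsiInner text pattern s then (s : Int) else fsiGo text pattern rest

def find_substring_indices (text pattern : List Char) : Int :=
  fsiGo text pattern (List.range ((text.length : Int) - (pattern.length : Int) + 1).toNat)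

def find_target_substrings (A : List String) (B : List String) : List Int × List String :=
  match A with
  | [] => ([], [])  -- A[0] raises IndexError in Python; excluded by Pre_
  | t :: _ =>
    let text := t.toList
    let found_pairs := B.foldl (fun acc w =>
      let index_found := find_substring_indices text w.toList
      if index_found ≠ -1 then acc ++ [(index_found, w)] else acc) []
    let sorted := PySem.List.sorted found_pairs (fun p => p.1) false
    (sorted.map Prod.fst, sorted.map Prod.snd)

-- ===== PORT B =====
-- 'for pos in range(len(text)+1)' with the early break; state = (first, remaining);
-- the inner 'for w in remaining' loop is the foldl
def altScan (text : List Char) : List Nat → PySem.Dict String Int → List String → PySem.Dict String Int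
  | [], first, _ => first
  | pos :: rest, first, remaining =>
    if remaining.isEmpty then first
    else
      let st := remaining.foldl (fun (acc : PySem.Dict String Int × List String) w =>
        if PySem.Chars.startswith (text.drop pos) w.toList
        then (acc.1.insert w (pos : Int), acc.2)
        else (acc.1, acc.2 ++ [w])) (first, [])
      altScan text rest st.1 st.2

def find_target_substrings_alt (A : List String) (B : List String) : List Int × List String :=
  match A with
  | [] => ([], [])  -- A[0] raises IndexError in Python; excluded by Pre_
  | t :: _ =>
    let text := t.toList
    let first := altScan text (List.range (text.length + 1)) PySem.Dict.empty (PySem.List.dedup B)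
    let pairs := B.filterMap fun w => (first.get? w).map (fun i => (i, w))
    let sorted := PySem.List.sorted pairs (fun p => p.1) false
    (sorted.map Prod.fst, sorted.map Prod.snd)

-- ===== PRECONDITION & SPEC =====
-- Pre_ excludes exactly the empty A, on which Python's A[0] raises IndexError.
def Pre_find_target_substrings (A : List String) (B : List String) : Prop := A ≠ []
instance (A : List String) (B : List String) : Decidable (Pre_find_target_substrings A B) := by unfold Pre_find_target_substrings; infer_instance
def pvWitness_find_target_substrings : List String × List String := (["abcab"], ["ab", "c", "zz", "b"])
def Spec_find_target_substrings (A : List String) (B : List String) (out : List Int × List String) : Prop := out = find_target_substrings_alt A B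
instance (A : List String) (B : List String) (out : List Int × List String) : Decidable (Spec_find_target_substrings A B out) := by unfold Spec_find_target_substrings; infer_instance

-- ===== CLAIM (what is proved, stated in full; the proofs are below) =====
def Claim_equal_find_target_substrings : Prop := ∀ (A : List String) (B : List String), Dom_find_target_substrings A B → Pre_find_target_substrings A B → Spec_find_target_substrings A B (find_target_substrings A B)



-- ===== LEMMAS AND PROOFS =====

-- B-side inner loop: the surviving `still` list is the filter of `remaining`
lemma stepSnd (text : List Char) (pos : Nat) (remaining : List String)
    (first : PySem.Dict String Int) (l : List String) :
    (remaining.foldl (fun (acc : PySem.Dict String Int × List String) w =>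
        if PySem.Chars.startswith (text.drop pos) w.toList
        then (acc.1.insert w (pos : Int), acc.2)
        else (acc.1, acc.2 ++ [w])) (first, l)).2
      = l ++ remaining.filter (fun w => !PySem.Chars.startswith (text.drop pos) w.toList) := by
  induction remaining generalizing first l with
  | nil => simp
  | cons v vs ih =>
    by_cases hp : PySem.Chars.startswith (text.drop pos) v.toList = true
    · simp [hp, ih]
    · simp only [Bool.not_eq_true] at hp
      simp [hp, ih]

-- B-side inner loop: effect on the dict, key by key
lemma stepFst (text : List Char) (pos : Nat) (remaining : List String)
    (first : PySem.Dict String Int) (l : List String) (w : String) :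
    ((remaining.foldl (fun (acc : PySem.Dict String Int × List String) w =>
        if PySem.Chars.startswith (text.drop pos) w.toList
        then (acc.1.insert w (pos : Int), acc.2)
        else (acc.1, acc.2 ++ [w])) (first, l)).1).get? w
      = if w ∈ remaining ∧ PySem.Chars.startswith (text.drop pos) w.toList = true
        then some (pos : Int) else first.get? w := by
  induction remaining generalizing first l with
  | nil => simp
  | cons v vs ih =>
    by_cases hp : PySem.Chars.startswith (text.drop pos) v.toList = true
    · simp only [List.foldl_cons, if_pos hp]
      rw [ih]
      by_cases hmem : w ∈ vs ∧ PySem.Chars.startswith (text.drop pos) w.toList = true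
      · simp [hmem, List.mem_cons.mpr (Or.inr hmem.1)]
      · rw [if_neg hmem, PySem.Dict.get?_insert]
        by_cases hwv : w = v
        · subst hwv; simp [hp]
        · simp only [if_neg hwv]
          have hnc : ¬ (w ∈ v :: vs ∧ PySem.Chars.startswith (text.drop pos) w.toList = true) := by
            rintro ⟨hm, hs⟩
            rcases List.mem_cons.mp hm with h | h
            · exact hwv h
            · exact hmem ⟨h, hs⟩
          rw [if_neg hnc]
    · simp only [List.foldl_cons, if_neg hp]
      rw [ih]
      by_cases hwv : w = v
      · subst hwv; simp [hp]
      · simp [List.mem_cons, hwv]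

-- once a word has left `remaining`, later positions never touch its dict entry
lemma scan_stable (text : List Char) (ps : List Nat) :
    ∀ (first : PySem.Dict String Int) (remaining : List String) (w : String),
      w ∉ remaining →
      (altScan text ps first remaining).get? w = first.get? w := by
  induction ps with
  | nil => intro first remaining w _; rfl
  | cons pos rest ih =>
    intro first remaining w hw
    by_cases he : remaining.isEmpty
    · simp [altScan, he]
    · simp only [altScan]
      rw [if_neg he, stepSnd, List.nil_append]
      rw [ih _ _ w (by simp only [List.mem_filter]; rintro ⟨h1, _⟩; exact hw h1)]
      rw [stepFst, if_neg (by rintro ⟨hm, _⟩; exact hw hm)]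

-- the scan computes, for each word still pending, its first matching position
lemma scan_main (text : List Char) (ps : List Nat) :
    ∀ (first : PySem.Dict String Int) (remaining : List String) (w : String),
      w ∈ remaining →
      (altScan text ps first remaining).get? w
        = match ps.find? (fun p => PySem.Chars.startswith (text.drop p) w.toList) with
          | some p => some ((p : Nat) : Int)
          | none => first.get? w := by
  induction ps with
  | nil => intro first remaining w _; rfl
  | cons pos rest ih =>
    intro first remaining w hw
    have he : ¬ remaining.isEmpty = true := by
      rw [List.isEmpty_iff]
      rintro rfl
      simp at hw
    simp only [altScan]
    rw [if_neg he, stepSnd, List.nil_append]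
    by_cases hp : PySem.Chars.startswith (text.drop pos) w.toList = true
    · rw [scan_stable text rest _ _ w (by simp [List.mem_filter, hp])]
      rw [stepFst, if_pos ⟨hw, hp⟩]
      simp [hp]
    · have hp' : PySem.Chars.startswith (text.drop pos) w.toList = false := by
        simpa using hp
      rw [ih _ _ w (by simp [List.mem_filter, hw, hp'])]
      rw [stepFst, if_neg (by rintro ⟨_, hs⟩; rw [hp'] at hs; cases hs)]
      simp only [List.find?_cons, hp']

-- A's inner character loop is a prefix test (all indices in range)
lemma inner_iff (text pattern : List Char) (s : Nat)
    (h : s + pattern.length ≤ text.length) :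
    fsiInner text pattern s = PySem.Chars.startswith (text.drop s) pattern := by
  rw [Bool.eq_iff_iff, PySem.Chars.startswith_iff, List.prefix_iff_eq_take]
  simp only [fsiInner, List.all_eq_true, List.mem_range, beq_iff_eq]
  constructor
  · intro hall
    apply List.ext_getElem
    · simp only [List.length_take, List.length_drop]; omega
    · intro i h1 h2
      have hi : i < pattern.length := h1
      have hti : s + i < text.length := by omega
      have hgd := hall i hi
      rw [List.getD_eq_getElem _ _ hti, List.getD_eq_getElem _ _ hi] at hgd
      rw [List.getElem_take, List.getElem_drop]
      exact hgd.symm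
  · intro heq i hi
    have hti : s + i < text.length := by omega
    rw [List.getD_eq_getElem _ _ hti, List.getD_eq_getElem _ _ hi]
    have h2 := List.getElem_of_eq heq hi
    rw [List.getElem_take, List.getElem_drop] at h2
    exact h2.symm

-- A's outer loop returns the first matching start, or -1
lemma fsiGo_eq (text pattern : List Char) (ps : List Nat)
    (h : ∀ s ∈ ps, s + pattern.length ≤ text.length) :
    fsiGo text pattern ps
      = match ps.find? (fun p => PySem.Chars.startswith (text.drop p) pattern) with
        | some p => ((p : Nat) : Int)
        | none => -1 := by
  induction ps with
  | nil => rfl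
  | cons s rest ih =>
    have hs := h s (List.mem_cons_self ..)
    show (if fsiInner text pattern s then ((s : Nat) : Int) else fsiGo text pattern rest) = _
    rw [inner_iff text pattern s hs]
    by_cases hp : PySem.Chars.startswith (text.drop s) pattern = true
    · simp [hp]
    · have hp' : PySem.Chars.startswith (text.drop s) pattern = false := by simpa using hp
      rw [if_neg (by simp [hp']), ih (fun x hx => h x (List.mem_cons_of_mem _ hx))]
      simp only [List.find?_cons, hp']

-- find_substring_indices searched over range(t-p+1); extend the search to range(t+1)
lemma fsi_eq (text pattern : List Char) :
    find_substring_indices text pattern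
      = match (List.range (text.length + 1)).find?
              (fun p => PySem.Chars.startswith (text.drop p) pattern) with
        | some p => ((p : Nat) : Int)
        | none => -1 := by
  set t := text.length with ht
  set m := pattern.length with hm
  set k := ((t : Int) - (m : Int) + 1).toNat with hk
  have hknot : ∀ s : Nat, s ≤ t →
      PySem.Chars.startswith (text.drop s) pattern = true → s < k := by
    intro s hs2 hs
    have hpre := (PySem.Chars.startswith_iff _ _).mp hs
    have hlen := hpre.length_le
    rw [List.length_drop, ← ht, ← hm] at hlen
    omega
  have hkle : k ≤ t + 1 := by omega
  have hsplit : List.range (t + 1)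
      = List.range k ++ (List.range (t + 1 - k)).map (fun x => k + x) := by
    rw [← List.range_add]
    congr 1
    omega
  rw [show find_substring_indices text pattern = fsiGo text pattern (List.range k) from rfl]
  rw [fsiGo_eq]
  · rw [hsplit, List.find?_append]
    have h2 : (List.find? (fun p => PySem.Chars.startswith (text.drop p) pattern)
        ((List.range (t + 1 - k)).map (fun x => k + x))) = none := by
      rw [List.find?_eq_none]
      intro x hx hpx
      simp only [List.mem_map, List.mem_range] at hx
      obtain ⟨j, hj, rfl⟩ := hx
      have := hknot (k + j) (by omega) hpx
      omega
    rw [h2, Option.or_none]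
  · intro s hs
    rw [List.mem_range] at hs
    omega

-- A's accumulation loop as a filterMap over B
lemma foldlA_eq (text : List Char) (l : List String) (acc : List (Int × String)) :
    l.foldl (fun acc w =>
        let index_found := find_substring_indices text w.toList
        if index_found ≠ -1 then acc ++ [(index_found, w)] else acc) acc
      = acc ++ l.filterMap (fun w =>
          let i := find_substring_indices text w.toList
          if i ≠ -1 then some (i, w) else none) := by
  induction l generalizing acc with
  | nil => simp
  | cons v vs ih =>
    simp only [List.foldl_cons, List.filterMap_cons]
    by_cases hv : find_substring_indices text v.toList = -1
    · rw [if_neg (fun hc => hc hv), if_neg (fun hc => hc hv), ih]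
    · rw [if_pos hv, if_pos hv, ih]
      simp

-- per word: A's found pair equals B's dict-lookup pair
lemma pairs_eq (text : List Char) (B : List String) :
    (B.filterMap (fun w =>
        let i := find_substring_indices text w.toList
        if i ≠ -1 then some (i, w) else none))
      = B.filterMap (fun w =>
          ((altScan text (List.range (text.length + 1)) PySem.Dict.empty
              (PySem.List.dedup B)).get? w).map (fun i => (i, w))) := by
  apply List.filterMap_congr
  intro w hw
  have hwd : w ∈ PySem.List.dedup B := (PySem.List.mem_dedup B w).mpr hw
  rw [scan_main text _ PySem.Dict.empty _ w hwd, fsi_eq]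
  cases hfind : (List.range (text.length + 1)).find?
      (fun p => PySem.Chars.startswith (text.drop p) w.toList) with
  | none => simp [PySem.Dict.get?_empty]
  | some p =>
    have hne : ((p : Nat) : Int) ≠ -1 := by omega
    simp [hne]

-- ===== VERDICT (by name: the statement is the Claim_ definition above) =====
theorem find_target_substrings_spec : Claim_equal_find_target_substrings := by
  intro A B _ hpre
  unfold Spec_find_target_substrings
  match A with
  | [] => exact absurd rfl hpre
  | t :: rest =>
    show find_target_substrings (t :: rest) B = find_target_substrings_alt (t :: rest) B
    simp only [find_target_substrings, find_target_substrings_alt]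
    rw [foldlA_eq, List.nil_append, pairs_eq]
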